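-- pv_equiv track=rewrite | github.com/floromo/Calico-Fall-24 | scv.py | solve
-- ===== SOURCE A (Python) =====
-- def solve(M: int, N: int, G: list) -> str:
--     """
--     Return the shape of displayed by ASCII string G of dimensions N x M
--
--     G: a string representing an ASCII picture
--     N: integer for number of rows
--     M: integer for number of columns
--
--     Phineas = triangle
--     Ferb = square
--     """
--     # YOUR CODE HERE
--     rowCount = []
--
--     # Check if each row has exactly M columns and count '#' characters
--     for row in G:
--         if len(row) != M:  # Validate the row length
--             return "invalid"
--         rowCount.append(row.count('#'))
--
--     # Remove rows that have no '#' characters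
--     rowCount = [count for count in rowCount if count > 0]
--
--     # Check if all row counts are the same (rectangle)
--     if all(count == rowCount[0] for count in rowCount):
--         return "ferb"
--
--     # Check if the shape is a triangle by checking for increasing or decreasing pattern
--     isIncreasing = True
--     for i in range(len(rowCount) - 1):
--         if rowCount[i] >= rowCount[i + 1]:
--             isIncreasing = False
--             break
--
--     isDecreasing = True
--     for i in range(len(rowCount) - 1):
--         if rowCount[i] <= rowCount[i + 1]:
--             isDecreasing = False
--             break
--
--     if isIncreasing or isDecreasing:
--         return "phineas"
-- ===== SOURCE B (Python) =====
-- def solve(M: int, N: int, G: list) -> str: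
--     if set(map(len, G)) - {M}:
--         return "invalid"
--     counts = [c for c in (row.count('#') for row in G) if c]
--     if len(set(counts)) <= 1:
--         return "ferb"
--     asc = sorted(counts)
--     if len(set(counts)) == len(counts) and (counts == asc or counts == asc[::-1]):
--         return "phineas"
-- ===== Notes on version B (the rewrite author's own statement) =====
-- stated objective: alternative
-- what changed: Replaces A's early-return validation loop and three pairwise scans (all-equal, strictly-increasing, strictly-decreasing) by a set/sort characterisation: validity via a set difference of row lengths, square via len(set(counts))<=1, triangle via counts being duplicate-free and equal to its sorted order or the reverse of it.
-- outside the precondition, e.g. on solve(2, 3, ['##', '# ', '##']): A returns None, B returns None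
import Mathlib
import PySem

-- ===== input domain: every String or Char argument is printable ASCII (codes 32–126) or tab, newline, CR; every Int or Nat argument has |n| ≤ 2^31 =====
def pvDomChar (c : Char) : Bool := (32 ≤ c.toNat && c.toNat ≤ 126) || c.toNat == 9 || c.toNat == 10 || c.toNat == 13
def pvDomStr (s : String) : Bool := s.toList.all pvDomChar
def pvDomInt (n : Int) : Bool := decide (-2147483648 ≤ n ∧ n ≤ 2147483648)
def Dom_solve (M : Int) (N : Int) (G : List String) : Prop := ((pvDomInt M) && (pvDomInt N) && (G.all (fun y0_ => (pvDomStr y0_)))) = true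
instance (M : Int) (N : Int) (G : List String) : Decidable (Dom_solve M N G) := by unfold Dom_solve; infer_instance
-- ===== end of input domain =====

-- B replaces A's early-return validation loop and three pairwise scans by a set/sort
-- characterisation (set difference of lengths; len(set)<=1 for squares; duplicate-free and
-- sorted-or-reverse-sorted for triangles) — a different decomposition, not faster.


-- ===== PORT A =====
-- the 'for row in G' loop: none models the early 'return "invalid"', else the rowCount list
def solveLoopA (M : Int) : List String → Option (List Int)
  | [] => some []
  | row :: rest =>
    if PySem.Str.len row ≠ M then none
    else (solveLoopA M rest).map (fun cs => ((PySem.Str.count row "#" : Nat) : Int) :: cs)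

-- the isIncreasing scan with break
def incLoopA : List Int → Bool
  | a :: b :: rest => if a ≥ b then false else incLoopA (b :: rest)
  | _ => true

-- the isDecreasing scan with break
def decLoopA : List Int → Bool
  | a :: b :: rest => if a ≤ b then false else decLoopA (b :: rest)
  | _ => true

-- A's implicit 'return None' on mixed shapes is outside Pre_solve; the port returns "" there.
def solve (M : Int) (N : Int) (G : List String) : String :=
  match solveLoopA M G with
  | none => "invalid"
  | some rc0 =>
    let rowCount := rc0.filter (fun c => 0 < c)
    match rowCount with
    | [] => "ferb"   -- all(...) over an empty generator is True
    | c0 :: _ =>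
      if rowCount.all (fun c => c == c0) then "ferb"
      else if incLoopA rowCount || decLoopA rowCount then "phineas"
      else ""

-- ===== PORT B =====
-- B's Python returns None on mixed shapes exactly as A does; outside Pre_solve the port returns "".
-- asc[::-1] is ported with PySem.List.slice? (step -1).
def solve_alt (M : Int) (N : Int) (G : List String) : String :=
  if PySem.Set.diff (PySem.Set.ofList (G.map PySem.Str.len)) [M] ≠ [] then "invalid"
  else
    let counts := (G.map (fun row => ((PySem.Str.count row "#" : Nat) : Int))).filter (fun c => c ≠ 0)
    if PySem.Set.len (PySem.Set.ofList counts) ≤ 1 then "ferb"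
    else
      let asc := PySem.List.sorted counts (fun x => x)
      if PySem.Set.len (PySem.Set.ofList counts) = (counts.length : Int) ∧
         (counts = asc ∨ counts = (PySem.List.slice? asc none none (-1)).getD []) then "phineas"
      else ""

-- ===== PRECONDITION & SPEC =====
-- Pre_solve excludes exactly the inputs where the Python A returns None instead of a str: every row
-- has length M but the positive '#'-counts are neither all equal nor strictly monotone.
def Pre_solve (M : Int) (N : Int) (G : List String) : Prop :=
  (∃ r ∈ G, PySem.Str.len r ≠ M) ∨
  ((G.map (fun r => ((PySem.Str.count r "#" : Nat) : Int))).filter (fun c => 0 < c)).IsChain (· = ·) ∨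
  ((G.map (fun r => ((PySem.Str.count r "#" : Nat) : Int))).filter (fun c => 0 < c)).IsChain (· < ·) ∨
  ((G.map (fun r => ((PySem.Str.count r "#" : Nat) : Int))).filter (fun c => 0 < c)).IsChain (· > ·)
instance (M : Int) (N : Int) (G : List String) : Decidable (Pre_solve M N G) := by
  unfold Pre_solve; infer_instance

def pvWitness_solve : Int × Int × List String := (2, 3, ["##", "#.", ".."])

def Spec_solve (M : Int) (N : Int) (G : List String) (out : String) : Prop := out = solve_alt M N G
instance (M : Int) (N : Int) (G : List String) (out : String) : Decidable (Spec_solve M N G out) := by unfold Spec_solve; infer_instance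

-- ===== CLAIM (what is proved, stated in full; the proofs are below) =====
def Claim_equal_solve : Prop := ∀ (M : Int) (N : Int) (G : List String), Dom_solve M N G → Pre_solve M N G → Spec_solve M N G (solve M N G)

-- ===== LEMMAS AND PROOFS =====

theorem solveLoopA_eq_none_iff (M : Int) (G : List String) :
    solveLoopA M G = none ↔ ∃ r ∈ G, PySem.Str.len r ≠ M := by
  induction G with
  | nil => simp [solveLoopA]
  | cons r t ih =>
    simp only [solveLoopA]
    split
    · rename_i h
      simp only [true_iff]
      exact ⟨r, List.mem_cons_self .., h⟩
    · rename_i h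
      rw [Option.map_eq_none_iff, ih]
      simp only [List.exists_mem_cons_iff]
      constructor
      · exact Or.inr
      · rintro (h' | h')
        · exact absurd h' h
        · exact h'

theorem solveLoopA_eq_some (M : Int) (G : List String)
    (h : ¬ ∃ r ∈ G, PySem.Str.len r ≠ M) :
    solveLoopA M G = some (G.map (fun r => ((PySem.Str.count r "#" : Nat) : Int))) := by
  induction G with
  | nil => simp [solveLoopA]
  | cons r t ih =>
    rw [not_exists] at h
    have h1 : ¬ PySem.Str.len r ≠ M := by
      intro hc; exact h r ⟨List.mem_cons_self .., hc⟩
    have ht : solveLoopA M t = some (t.map (fun r => ((PySem.Str.count r "#" : Nat) : Int))) := by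
      apply ih
      rintro ⟨x, hx, hc⟩
      exact h x ⟨List.mem_cons_of_mem _ hx, hc⟩
    simp only [solveLoopA, h1, if_false, ht, Option.map_some, List.map_cons]

theorem incLoopA_eq_true_iff (cs : List Int) : incLoopA cs = true ↔ cs.IsChain (· < ·) := by
  induction cs with
  | nil => simpa [incLoopA] using List.isChain_nil
  | cons a t ih =>
    cases t with
    | nil => simpa [incLoopA] using List.isChain_singleton a
    | cons b t' =>
      rw [List.isChain_cons_cons, ← ih]
      by_cases hab : a ≥ b
      · simp [incLoopA, hab]
      · simp only [incLoopA, hab, if_false, iff_and_self]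
        intro; omega

theorem decLoopA_eq_true_iff (cs : List Int) : decLoopA cs = true ↔ cs.IsChain (· > ·) := by
  induction cs with
  | nil => simpa [decLoopA] using List.isChain_nil
  | cons a t ih =>
    cases t with
    | nil => simpa [decLoopA] using List.isChain_singleton a
    | cons b t' =>
      rw [List.isChain_cons_cons, ← ih]
      by_cases hab : a ≤ b
      · simp [decLoopA, hab]
      · simp only [decLoopA, hab, if_false, iff_and_self]
        intro; omega

theorem allEq_iff_chain (c0 : Int) (t : List Int) :
    ((c0 :: t).all (fun c => c == c0) = true) ↔ (c0 :: t).IsChain (· = ·) := by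
  induction t generalizing c0 with
  | nil => simpa using List.isChain_singleton c0
  | cons b t' ih =>
    rw [List.isChain_cons_cons]
    constructor
    · intro h
      simp only [List.all_cons, Bool.and_eq_true, beq_iff_eq] at h
      obtain ⟨-, hb, hrest⟩ := h
      subst hb
      exact ⟨rfl, (ih _).mp (by simp only [List.all_cons, beq_self_eq_true, Bool.true_and]; exact hrest)⟩
    · rintro ⟨hab, hrest⟩
      subst hab
      have := (ih _).mpr hrest
      simp only [List.all_cons, beq_self_eq_true, Bool.true_and] at this ⊢
      exact this

-- B's validation test read as a statement about G
theorem diff_lens_ne_nil_iff (M : Int) (G : List String) :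
    (PySem.Set.diff (PySem.Set.ofList (G.map PySem.Str.len)) [M] ≠ []) ↔
      ∃ r ∈ G, PySem.Str.len r ≠ M := by
  rw [← List.isEmpty_eq_false_iff, List.isEmpty_eq_false_iff_exists_mem]
  constructor
  · rintro ⟨x, hx⟩
    simp only [PySem.Set.diff, List.mem_filter, PySem.Set.mem_ofList, List.mem_map] at hx
    obtain ⟨⟨r, hr, rfl⟩, hne⟩ := hx
    refine ⟨r, hr, ?_⟩
    intro hc
    rw [hc] at hne
    simp [PySem.Set.contains] at hne
  · rintro ⟨r, hr, hne⟩
    refine ⟨PySem.Str.len r, ?_⟩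
    simp only [PySem.Set.diff, List.mem_filter, PySem.Set.mem_ofList, List.mem_map]
    refine ⟨⟨r, hr, rfl⟩, ?_⟩
    simpa [PySem.Set.contains, PySem.Str.len] using hne

-- the two filters ('count > 0' in A, truthiness 'if c' in B) agree on nat-cast counts
theorem filter_pos_eq_filter_ne_zero (G : List String) :
    (G.map (fun r => ((PySem.Str.count r "#" : Nat) : Int))).filter (fun c => 0 < c) =
    (G.map (fun r => ((PySem.Str.count r "#" : Nat) : Int))).filter (fun c => c ≠ 0) := by
  apply List.filter_congr
  intro c hc
  obtain ⟨r, -, rfl⟩ := List.mem_map.mp hc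
  simp only [decide_eq_decide]
  omega

theorem foldl_add_nodup (acc l : List Int) (h : (acc ++ l).Nodup) :
    l.foldl PySem.Set.add acc = acc ++ l := by
  induction l generalizing acc with
  | nil => simp
  | cons x t ih =>
    have hx : x ∉ acc := by
      intro hmem
      exact (List.disjoint_of_nodup_append h) hmem (List.mem_cons_self ..)
    have hadd : PySem.Set.add acc x = acc ++ [x] := by
      simp only [PySem.Set.add]
      rw [if_neg]
      simpa [PySem.Set.contains] using hx
    rw [List.foldl_cons, hadd, ih (acc ++ [x]) (by simpa using h)]
    simp

theorem ofList_eq_self_of_nodup (l : List Int) (h : l.Nodup) : PySem.Set.ofList l = l := by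
  rw [PySem.Set.ofList_eq_foldl]
  simpa using foldl_add_nodup [] l (by simpa using h)

theorem foldl_add_const (v : Int) (l : List Int) (h : ∀ x ∈ l, x = v) :
    l.foldl PySem.Set.add [v] = [v] := by
  induction l with
  | nil => rfl
  | cons x t ih =>
    have hx := h x (List.mem_cons_self ..)
    subst hx
    have hadd : PySem.Set.add [x] x = [x] := by simp [PySem.Set.add, PySem.Set.contains]
    simp only [List.foldl_cons, hadd]
    exact ih (fun y hy => h y (List.mem_cons_of_mem _ hy))

theorem ofList_const (v : Int) (l : List Int) (h : ∀ x ∈ l, x = v) (hne : l ≠ []) :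
    PySem.Set.ofList l = [v] := by
  cases l with
  | nil => exact absurd rfl hne
  | cons x t =>
    have hx := h x (List.mem_cons_self ..)
    subst hx
    rw [PySem.Set.ofList_eq_foldl]
    have hadd : PySem.Set.add [] x = [x] := by simp [PySem.Set.add, PySem.Set.contains]
    simp only [List.foldl_cons, hadd]
    exact foldl_add_const x t (fun y hy => h y (List.mem_cons_of_mem _ hy))

theorem chain_eq_all_eq_head (c0 : Int) (t : List Int) (h : (c0 :: t).IsChain (· = ·)) :
    ∀ x ∈ c0 :: t, x = c0 := by
  induction t generalizing c0 with
  | nil => simp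
  | cons b t' ih =>
    obtain ⟨hab, hrest⟩ := List.isChain_cons_cons.mp h
    subst hab
    intro x hx
    rcases List.mem_cons.mp hx with h' | h'
    · exact h'
    · exact ih c0 hrest x h'

-- A's branch computation after validation succeeded, as a function of the filtered count list
def classifyA (cs : List Int) : String :=
  match cs with
  | [] => "ferb"
  | c0 :: _ =>
    if cs.all (fun c => c == c0) then "ferb"
    else if incLoopA cs || decLoopA cs then "phineas"
    else ""

-- B's branch computation on the same list
def classifyB (cs : List Int) : String :=
  if PySem.Set.len (PySem.Set.ofList cs) ≤ 1 then "ferb"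
  else
    let asc := PySem.List.sorted cs (fun x => x)
    if PySem.Set.len (PySem.Set.ofList cs) = (cs.length : Int) ∧
       (cs = asc ∨ cs = (PySem.List.slice? asc none none (-1)).getD []) then "phineas"
    else ""

theorem classify_eq (cs : List Int)
    (hadj : cs.IsChain (· = ·) ∨ cs.IsChain (· < ·) ∨ cs.IsChain (· > ·)) :
    classifyA cs = classifyB cs := by
  unfold classifyA classifyB
  cases cs with
  | nil => simp [PySem.Set.ofList, PySem.Set.len]
  | cons c0 t =>
    by_cases hall : (c0 :: t).all (fun c => c == c0) = true
    · have hchain := (allEq_iff_chain c0 t).mp hall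
      have hset : PySem.Set.ofList (c0 :: t) = [c0] :=
        ofList_const c0 _ (chain_eq_all_eq_head c0 t hchain) (by simp)
      simp [hall, hset, PySem.Set.len]
    · have hne : ¬ (c0 :: t).IsChain (· = ·) := fun h => hall ((allEq_iff_chain c0 t).mpr h)
      have hmono : (c0 :: t).IsChain (· < ·) ∨ (c0 :: t).IsChain (· > ·) := by
        rcases hadj with h | h | h
        · exact absurd h hne
        · exact Or.inl h
        · exact Or.inr h
      obtain ⟨c1, t', rfl⟩ : ∃ c1 t', t = c1 :: t' := by
        cases t with
        | nil => exact absurd (List.isChain_singleton c0) hne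
        | cons c1 t' => exact ⟨c1, t', rfl⟩
      have hpw : (c0 :: c1 :: t').Pairwise (· < ·) ∨ (c0 :: c1 :: t').Pairwise (· > ·) := by
        rcases hmono with h | h
        · exact Or.inl (List.isChain_iff_pairwise.mp h)
        · exact Or.inr (List.isChain_iff_pairwise.mp h)
      have hnodup : (c0 :: c1 :: t').Nodup := by
        rcases hpw with h | h
        · exact h.imp (fun hlt => ne_of_lt hlt)
        · exact h.imp (fun hgt => ne_of_gt hgt)
      have hset : PySem.Set.ofList (c0 :: c1 :: t') = c0 :: c1 :: t' :=
        ofList_eq_self_of_nodup _ hnodup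
      rcases hmono with h | h
      · have hsort : PySem.List.sorted (c0 :: c1 :: t') (fun x => x) = c0 :: c1 :: t' :=
          PySem.List.sorted_eq_of_perm_of_pairwise_lt _ _ _ (List.Perm.refl _)
            (List.isChain_iff_pairwise.mp h)
        have hinc : incLoopA (c0 :: c1 :: t') = true := (incLoopA_eq_true_iff _).mpr h
        simp only [hall, Bool.false_eq_true, if_false, hinc, Bool.true_or, if_true, hset, hsort]
        rw [if_neg (by simp [PySem.Set.len]), if_pos (by simp [PySem.Set.len])]
      · have hsort : PySem.List.sorted (c0 :: c1 :: t') (fun x => x) = (c0 :: c1 :: t').reverse :=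
          PySem.List.sorted_eq_of_perm_of_pairwise_lt _ _ _ (List.reverse_perm _)
            (by
              rw [List.pairwise_reverse]
              exact (List.isChain_iff_pairwise.mp h))
        have hdec : decLoopA (c0 :: c1 :: t') = true := (decLoopA_eq_true_iff _).mpr h
        simp only [hall, Bool.false_eq_true, if_false, hdec, Bool.or_true, if_true, hset, hsort,
          PySem.List.slice?_none_none_neg_one, Option.getD_some, List.reverse_reverse]
        rw [if_neg (by simp [PySem.Set.len]), if_pos (by simp [PySem.Set.len])]

-- ===== VERDICT (by name: the statement is the Claim_ definition above) =====
theorem solve_spec : Claim_equal_solve := by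
  intro M N G _hdom hpre
  unfold Spec_solve
  by_cases hbad : ∃ r ∈ G, PySem.Str.len r ≠ M
  · have hA : solve M N G = "invalid" := by
      unfold solve
      rw [(solveLoopA_eq_none_iff M G).mpr hbad]
    have hB : solve_alt M N G = "invalid" := by
      unfold solve_alt
      rw [if_pos ((diff_lens_ne_nil_iff M G).mpr hbad)]
    rw [hA, hB]
  · have hadj :
        ((G.map (fun r => ((PySem.Str.count r "#" : Nat) : Int))).filter (fun c => 0 < c)).IsChain (· = ·) ∨
        ((G.map (fun r => ((PySem.Str.count r "#" : Nat) : Int))).filter (fun c => 0 < c)).IsChain (· < ·) ∨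
        ((G.map (fun r => ((PySem.Str.count r "#" : Nat) : Int))).filter (fun c => 0 < c)).IsChain (· > ·) := by
      rcases hpre with h | h
      · exact absurd h hbad
      · exact h
    have hA : solve M N G =
        classifyA ((G.map (fun r => ((PySem.Str.count r "#" : Nat) : Int))).filter (fun c => 0 < c)) := by
      unfold solve classifyA
      rw [solveLoopA_eq_some M G hbad]
    have hB : solve_alt M N G =
        classifyB ((G.map (fun r => ((PySem.Str.count r "#" : Nat) : Int))).filter (fun c => 0 < c)) := by
      unfold solve_alt classifyB
      rw [if_neg (by rw [diff_lens_ne_nil_iff]; exact hbad), filter_pos_eq_filter_ne_zero]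
    rw [hA, hB]
    exact classify_eq _ hadj
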